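-- pv_equiv track=rewrite | github.com/2do1/Algorithm | Baekjoon/String/4659 비밀번호 발음하기/solution.py | check_vowel_or_consonant_three_times
-- ===== SOURCE A (Python) =====
-- def check_vowel_or_consonant_three_times(word):
--     if len(word) <= 2:
--         return True
--
--     for index in range(len(word) - 2):
--         sub_string = word[index:index + 3]
--         consonant = 0 # 자음
--         vowel = 0 # 모음
--         for alphabet in sub_string:
--             if alphabet in vowels:
--                 vowel += 1
--             else:
--                 consonant += 1
--         if vowel == 3 or consonant == 3:
--             return False
--
--     return True
--
-- vowels = ['a', 'e', 'i', 'o', 'u']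
-- ===== SOURCE B (Python) =====
-- vowels = ['a', 'e', 'i', 'o', 'u']
--
-- def check_vowel_or_consonant_three_times(word):
--     prev = None
--     run = 0
--     for ch in word:
--         t = ch in vowels
--         if prev == t:
--             run += 1
--         else:
--             prev = t
--             run = 1
--         if run == 3:
--             return False
--     return True
-- ===== Notes on version B (the rewrite author's own statement) =====
-- stated objective: faster
-- what changed: Replaced the nested scan (every length-3 window re-counted from scratch) by a single pass maintaining the previous character's type and a run-length counter that fails as soon as a run reaches 3.
import Mathlib
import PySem

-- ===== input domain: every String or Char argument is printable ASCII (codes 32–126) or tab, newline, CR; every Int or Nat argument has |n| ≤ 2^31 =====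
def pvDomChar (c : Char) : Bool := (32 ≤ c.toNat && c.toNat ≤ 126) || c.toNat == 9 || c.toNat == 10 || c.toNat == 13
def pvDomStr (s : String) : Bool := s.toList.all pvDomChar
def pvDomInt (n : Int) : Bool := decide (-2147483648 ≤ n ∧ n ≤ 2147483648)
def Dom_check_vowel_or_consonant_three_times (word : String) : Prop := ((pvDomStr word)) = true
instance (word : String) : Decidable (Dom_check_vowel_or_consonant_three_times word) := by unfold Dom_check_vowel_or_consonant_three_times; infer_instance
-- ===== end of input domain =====

-- B replaces A's nested scan over all length-3 windows by a single pass with a run-length counter (objective: faster by a constant factor).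

-- ===== PORT A =====
def vowels : List Char := ['a', 'e', 'i', 'o', 'u']

-- body of A's outer loop for one index i (window check; early 'return False' in the loop = .all)
def pvWindowOK (cs : List Char) (i : Int) : Bool :=
  let sub := PySem.List.slice cs (some i) (some (i + 3))
  let counts := sub.foldl
    (fun (p : Int × Int) alphabet =>
      if vowels.contains alphabet then (p.1, p.2 + 1) else (p.1 + 1, p.2)) (0, 0)
  !(counts.2 == 3 || counts.1 == 3)

def check_vowel_or_consonant_three_times (word : String) : Bool :=
  let cs := word.toList
  if cs.length ≤ 2 then true
  else (PySem.List.pyRange 0 ((cs.length : Int) - 2) 1).all (pvWindowOK cs)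

-- ===== PORT B =====
-- B's single pass: prev = type of previous char (none before the first), run = current run length
def pvRunLoop : List Char → Option Bool → Nat → Bool
  | [], _, _ => true
  | c :: rest, prev, run =>
    let t := vowels.contains c
    let run' := if prev = some t then run + 1 else 1
    if run' == 3 then false else pvRunLoop rest (some t) run'

def check_vowel_or_consonant_three_times_alt (word : String) : Bool :=
  pvRunLoop word.toList none 0

-- ===== PRECONDITION & SPEC =====
def Spec_check_vowel_or_consonant_three_times (word : String) (out : Bool) : Prop := out = check_vowel_or_consonant_three_times_alt word
instance (word : String) (out : Bool) : Decidable (Spec_check_vowel_or_consonant_three_times word out) := by unfold Spec_check_vowel_or_consonant_three_times; infer_instance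

-- ===== CLAIM (what is proved, stated in full; the proofs are below) =====
def Claim_equal_check_vowel_or_consonant_three_times : Prop := ∀ (word : String), Dom_check_vowel_or_consonant_three_times word → Spec_check_vowel_or_consonant_three_times word (check_vowel_or_consonant_three_times word)

-- ===== LEMMAS AND PROOFS =====

-- common reference point: no three consecutive equal entries in the list of types
def pvNoTriple : List Bool → Bool
  | x :: y :: z :: r => if x == y && y == z then false else pvNoTriple (y :: z :: r)
  | _ => true

theorem pvNoTriple_ne (p t : Bool) (ts : List Bool) (h : p ≠ t) :
    pvNoTriple (p :: t :: ts) = pvNoTriple (t :: ts) := by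
  cases ts with
  | nil => simp [pvNoTriple]
  | cons u w => simp [pvNoTriple, h]

theorem pvRunLoop_step (c : Char) (rest : List Char) (p : Bool) (run : Nat) :
    pvRunLoop (c :: rest) (some p) run =
      if p = vowels.contains c then
        (if run + 1 == 3 then false else pvRunLoop rest (some (vowels.contains c)) (run + 1))
      else pvRunLoop rest (some (vowels.contains c)) 1 := by
  have hc : vowels.contains c = decide (c ∈ vowels) := by simp [List.contains_eq_mem]
  rw [hc]
  by_cases h : p = decide (c ∈ vowels) <;> simp [pvRunLoop, h]

theorem pvRunLoop_eq (cs : List Char) (p : Bool) :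
    pvRunLoop cs (some p) 1 = pvNoTriple (p :: cs.map vowels.contains) ∧
    pvRunLoop cs (some p) 2 = pvNoTriple (p :: p :: cs.map vowels.contains) := by
  induction cs generalizing p with
  | nil => simp [pvRunLoop, pvNoTriple]
  | cons c rest ih =>
    rw [List.map_cons, pvRunLoop_step, pvRunLoop_step]
    have iht := ih (vowels.contains c)
    generalize ht : vowels.contains c = t at *
    by_cases h : p = t
    · rw [if_pos h, if_pos h, h]
      refine ⟨?_, ?_⟩
      · exact iht.2
      · simp [pvNoTriple]
    · rw [if_neg h, if_neg h]
      refine ⟨?_, ?_⟩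
      · rw [iht.1]
        exact (pvNoTriple_ne p t _ h).symm
      · rw [iht.1]
        have h2 : pvNoTriple (p :: p :: t :: rest.map vowels.contains)
            = pvNoTriple (p :: t :: rest.map vowels.contains) := by
          simp [pvNoTriple, h]
        rw [h2, pvNoTriple_ne p t _ h]

theorem alt_eq_noTriple (cs : List Char) :
    pvRunLoop cs none 0 = pvNoTriple (cs.map vowels.contains) := by
  cases cs with
  | nil => simp [pvRunLoop, pvNoTriple]
  | cons c rest =>
    have := (pvRunLoop_eq rest (vowels.contains c)).1
    simpa [pvRunLoop] using this

-- A's window check at index 0 of a list with ≥ 3 elements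
theorem windowOK_zero (a b c : Char) (t : List Char) :
    pvWindowOK (a :: b :: c :: t) 0
      = !((vowels.contains a == vowels.contains b) &&
          (vowels.contains b == vowels.contains c)) := by
  have hs : PySem.List.slice (a :: b :: c :: t) (some (0 : Int)) (some ((0 : Int) + 3))
      = [a, b, c] := by
    have := PySem.List.slice_natCast_add (xs := a :: b :: c :: t) (j := 0) (n := 3)
    simpa using this
  unfold pvWindowOK
  rw [hs]
  by_cases hva : a ∈ vowels <;> by_cases hvb : b ∈ vowels <;> by_cases hvc : c ∈ vowels <;>
    simp [List.contains_eq_mem, hva, hvb, hvc]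

-- shifting the window index past a prepended element
theorem windowOK_shift (x : Char) (cs : List Char) (k : Nat) :
    pvWindowOK (x :: cs) ((k : Int) + 1) = pvWindowOK cs (k : Int) := by
  unfold pvWindowOK
  have h1 : PySem.List.slice (x :: cs) (some ((k : Int) + 1)) (some ((k : Int) + 1 + 3))
      = (cs.drop k).take 3 := by
    have := PySem.List.slice_natCast_add (xs := x :: cs) (j := k + 1) (n := 3)
    simpa [Nat.cast_add] using this
  have h2 : PySem.List.slice cs (some (k : Int)) (some ((k : Int) + 3))
      = (cs.drop k).take 3 := by
    have := PySem.List.slice_natCast_add (xs := cs) (j := k) (n := 3)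
    simpa using this
  rw [h1, h2]

theorem a_all_eq_noTriple (cs : List Char) :
    (List.range (cs.length - 2)).all (fun k => pvWindowOK cs (k : Int))
      = pvNoTriple (cs.map vowels.contains) := by
  induction cs with
  | nil => simp [pvNoTriple]
  | cons a tail ih =>
    match tail with
    | [] => simp [pvNoTriple]
    | [b] => simp [pvNoTriple]
    | b :: c :: r =>
      have hlen : (a :: b :: c :: r).length - 2 = (r.length + 1) := by simp
      have htail : (b :: c :: r).length - 2 = r.length := by simp
      rw [htail] at ih
      rw [hlen, List.range_succ_eq_map]
      simp only [List.all_cons, List.all_map, Function.comp_def, Nat.succ_eq_add_one,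
        Nat.cast_zero, Nat.cast_add, Nat.cast_one]
      have hall : ((List.range r.length).all
            fun k => pvWindowOK (a :: b :: c :: r) ((k : Int) + 1))
          = (List.range r.length).all (fun k => pvWindowOK (b :: c :: r) (k : Int)) := by
        congr 1
        funext k
        exact windowOK_shift a (b :: c :: r) k
      rw [hall, ih, windowOK_zero]
      simp only [List.map_cons, pvNoTriple]
      cases h : (vowels.contains a == vowels.contains b &&
          (vowels.contains b == vowels.contains c)) <;> simp [h]

theorem pvNoTriple_short (ts : List Bool) (h : ts.length ≤ 2) : pvNoTriple ts = true := by
  match ts, h with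
  | [], _ => rfl
  | [_], _ => rfl
  | [_, _], _ => rfl

-- ===== VERDICT (by name: the statement is the Claim_ definition above) =====
theorem check_vowel_or_consonant_three_times_spec : Claim_equal_check_vowel_or_consonant_three_times := by
  intro word _
  unfold Spec_check_vowel_or_consonant_three_times
  unfold check_vowel_or_consonant_three_times check_vowel_or_consonant_three_times_alt
  rw [alt_eq_noTriple]
  set cs := word.toList with hcs
  by_cases h : cs.length ≤ 2
  · simp only [h, if_true]
    rw [pvNoTriple_short _ (by simpa using h)]
  · simp only [h, if_false]
    rw [← a_all_eq_noTriple cs]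
    have hn : ((cs.length : Int) - 2) = ((cs.length - 2 : Nat) : Int) := by
      push_cast [Nat.cast_sub (by omega : 2 ≤ cs.length)]; ring
    rw [hn, PySem.List.pyRange_zero_natCast]
    simp [List.all_map, Function.comp_def]
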